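-- pv_equiv track=rewrite | github.com/m4reQ/spyke | spyke/utils/__init__.py | create_quad_indices
-- ===== SOURCE A (Python) =====
-- from typing import Callable, Sequence, List, TypeVar, Iterator as _Iterator
--
-- def create_quad_indices(quadsCount: int) -> List[int]:
--     data = []
--
--     offset = 0
--     i = 0
--     while i < quadsCount:
--         data.extend([
--             0 + offset,
--             1 + offset,
--             2 + offset,
--             2 + offset,
--             3 + offset,
--             0 + offset])
--
--         offset += 4
--         i += 1
--
--     return data
-- ===== SOURCE B (Python) =====
-- PATTERN = [0, 1, 2, 2, 3, 0]
--
-- def create_quad_indices(quadsCount: int):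
--     return [4 * (j // 6) + PATTERN[j % 6] for j in range(6 * quadsCount)]
-- ===== Notes on version B (the rewrite author's own statement) =====
-- stated objective: simpler
-- what changed: Replaced the while-loop with an incrementing offset accumulator by a single comprehension over flat output positions, deriving each element from a constant 6-entry pattern table via j//6 and j%6.
import Mathlib
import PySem

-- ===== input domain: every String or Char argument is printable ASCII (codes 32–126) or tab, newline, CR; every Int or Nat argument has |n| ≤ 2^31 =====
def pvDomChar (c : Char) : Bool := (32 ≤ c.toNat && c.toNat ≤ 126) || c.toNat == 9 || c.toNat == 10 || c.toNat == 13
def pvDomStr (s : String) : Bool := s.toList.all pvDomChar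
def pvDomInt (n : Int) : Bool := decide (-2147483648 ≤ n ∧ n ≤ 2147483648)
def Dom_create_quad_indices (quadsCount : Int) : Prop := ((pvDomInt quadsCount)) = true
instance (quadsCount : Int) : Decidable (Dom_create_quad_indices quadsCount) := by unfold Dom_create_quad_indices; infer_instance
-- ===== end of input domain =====

-- B replaces A's offset-accumulating while-loop by a comprehension over flat output
-- positions using a constant pattern table and j//6, j%6 (objective: simpler).

-- ===== PORT A =====
-- the while-loop of A: state (data, offset, i), one recursive call per iteration
def quadLoop (quadsCount : Int) (data : List Int) (offset i : Int) : List Int :=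
  if _h : i < quadsCount then
    quadLoop quadsCount
      (data ++ [0 + offset, 1 + offset, 2 + offset, 2 + offset, 3 + offset, 0 + offset])
      (offset + 4) (i + 1)
  else data
termination_by (quadsCount - i).toNat
decreasing_by omega

def create_quad_indices (quadsCount : Int) : List Int :=
  quadLoop quadsCount [] 0 0

-- ===== PORT B =====
def quadPATTERN : List Int := [0, 1, 2, 2, 3, 0]

def create_quad_indices_alt (quadsCount : Int) : List Int :=
  -- PATTERN[j % 6]: the index is always in range (0 ≤ j % 6 < 6), so pyGetD is exact here
  (PySem.List.pyRange 0 (6 * quadsCount) 1).map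
    (fun j => 4 * PySem.Int.floordiv j 6 + PySem.List.pyGetD quadPATTERN (PySem.Int.mod j 6) 0)

-- ===== PRECONDITION & SPEC =====
def Spec_create_quad_indices (quadsCount : Int) (out : List Int) : Prop := out = create_quad_indices_alt quadsCount
instance (quadsCount : Int) (out : List Int) : Decidable (Spec_create_quad_indices quadsCount out) := by unfold Spec_create_quad_indices; infer_instance

-- ===== CLAIM (what is proved, stated in full; the proofs are below) =====
def Claim_equal_create_quad_indices : Prop := ∀ (quadsCount : Int), Dom_create_quad_indices quadsCount → Spec_create_quad_indices quadsCount (create_quad_indices quadsCount)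

-- ===== LEMMAS AND PROOFS =====

-- canonical form: n blocks starting at offset off, consecutive blocks 4 apart
def quadCanon : Nat → Int → List Int
  | 0, _ => []
  | n+1, off => [off, 1+off, 2+off, 2+off, 3+off, off] ++ quadCanon n (off+4)

lemma quadLoop_eq (n : Nat) : ∀ (q i off : Int) (data : List Int), (q - i).toNat = n →
    quadLoop q data off i = data ++ quadCanon n off := by
  induction n with
  | zero =>
    intro q i off data h
    rw [quadLoop, dif_neg (by omega)]
    simp [quadCanon]
  | succ m ih =>
    intro q i off data h
    rw [quadLoop, dif_pos (by omega), ih q (i+1) (off+4) _ (by omega), quadCanon]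
    simp

lemma quadCanon_succ_right (n : Nat) : ∀ (off : Int),
    quadCanon (n+1) off = quadCanon n off ++ [off+4*n, off+4*n+1, off+4*n+2, off+4*n+2, off+4*n+3, off+4*n] := by
  induction n with
  | zero =>
    intro off
    simp only [quadCanon, List.append_nil, List.nil_append, List.cons.injEq, and_true]
    push_cast
    omega
  | succ m ih =>
    intro off
    rw [show m+1+1 = (m+1)+1 from rfl, quadCanon, ih (off+4), quadCanon]
    simp only [List.cons_append, List.nil_append, List.cons.injEq,
      List.append_right_inj, and_true, true_and]
    push_cast
    omega

lemma quad_f_eval (n : Nat) (r : Int) (hr0 : 0 ≤ r) (hr : r < 6) :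
    4 * PySem.Int.floordiv (6*(n:Int)+r) 6 + PySem.List.pyGetD quadPATTERN (PySem.Int.mod (6*(n:Int)+r) 6) 0
      = 4*(n:Int) + PySem.List.pyGetD quadPATTERN r 0 := by
  rw [PySem.Int.floordiv_eq_ediv_of_pos (by omega), PySem.Int.mod_eq_emod_of_pos (by omega)]
  have h1 : (6*(n:Int)+r) / 6 = n := by omega
  have h2 : (6*(n:Int)+r) % 6 = r := by omega
  rw [h1, h2]

lemma alt_canon (n : Nat) : create_quad_indices_alt (n : Int) = quadCanon n 0 := by
  induction n with
  | zero => simp [create_quad_indices_alt, quadCanon, PySem.List.pyRange_one_eq_nil]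
  | succ m ih =>
    unfold create_quad_indices_alt at *
    have hsplit : PySem.List.pyRange 0 (6 * ((m+1 : Nat) : Int)) 1
        = PySem.List.pyRange 0 (6*(m:Int)) 1 ++ PySem.List.pyRange (6*(m:Int)) (6*(m:Int)+6) 1 := by
      rw [← PySem.List.pyRange_one_append 0 (6*(m:Int)) (6*(m:Int)+6) (by omega) (by omega)]
      congr 1
    have htail : PySem.List.pyRange (6*(m:Int)) (6*(m:Int)+6) 1
        = [6*(m:Int), 6*m+1, 6*m+2, 6*m+3, 6*m+4, 6*m+5] := by
      rw [PySem.List.pyRange_one]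
      have h6 : (6*(m:Int)+6-6*(m:Int)).toNat = 6 := by omega
      rw [h6]
      simp only [List.range_succ, List.range_zero, List.nil_append, List.map_cons,
        List.map_nil, List.cons_append, List.cons.injEq, and_true]
      omega
    have e0 := quad_f_eval m 0 (by omega) (by omega)
    simp only [add_zero] at e0
    have e1 := quad_f_eval m 1 (by omega) (by omega)
    have e2 := quad_f_eval m 2 (by omega) (by omega)
    have e3 := quad_f_eval m 3 (by omega) (by omega)
    have e4 := quad_f_eval m 4 (by omega) (by omega)
    have e5 := quad_f_eval m 5 (by omega) (by omega)
    rw [hsplit, htail, List.map_append, ih, quadCanon_succ_right]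
    congr 1
    simp only [List.map_cons, List.map_nil]
    rw [e0, e1, e2, e3, e4, e5]
    norm_num [quadPATTERN, PySem.List.pyGetD, PySem.List.pyGet?, PySem.List.pyIdx?]
    decide

lemma alt_neg (q : Int) (h : q ≤ 0) : create_quad_indices_alt q = [] := by
  unfold create_quad_indices_alt
  rw [PySem.List.pyRange_one_eq_nil (by omega)]
  rfl

-- ===== VERDICT (by name: the statement is the Claim_ definition above) =====
theorem create_quad_indices_spec : Claim_equal_create_quad_indices := by
  intro q _
  unfold Spec_create_quad_indices create_quad_indices
  rw [quadLoop_eq q.toNat q 0 0 [] (by omega), List.nil_append]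
  by_cases h : q ≤ 0
  · rw [alt_neg q h]
    have : q.toNat = 0 := by omega
    rw [this]; rfl
  · have hq : q = (q.toNat : Int) := by omega
    conv_rhs => rw [hq]
    rw [alt_canon]
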